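-- pv_equiv track=rewrite | github.com/alex0sunny/probation_tasks | tasks/remove_smiles.py | remove_smiles
-- ===== SOURCE A (Python) =====
-- def remove_smiles(s):
--     pos = 0
--     out = []
--     while pos < len(s):
--         if s[pos] not in ';:':
--             out.append(s[pos])
--             pos += 1
--             continue
--         back = pos
--         pos += 1
--         while pos < len(s) and s[pos] == '-':
--             pos += 1
--         while pos < len(s) and s[pos] in '(){}[]':
--             pos += 1
--         if s[pos-1] not in '(){}[]':
--             out.extend(s[back:pos])
--     return ''.join(out)
-- ===== SOURCE B (Python) =====
-- import re
--
-- _SMILE = re.compile(r'[;:]-*[(){}\[\]]+')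
--
-- def remove_smiles(s):
--     return _SMILE.sub('', s)
-- ===== Notes on version B (the rewrite author's own statement) =====
-- stated objective: idiomatic
-- what changed: Replaces the hand-written position-advancing state machine (index loop with two inner while loops and an output buffer) by a single compiled regular-expression substitution deleting every starter/dashes/brackets match.
import Mathlib
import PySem

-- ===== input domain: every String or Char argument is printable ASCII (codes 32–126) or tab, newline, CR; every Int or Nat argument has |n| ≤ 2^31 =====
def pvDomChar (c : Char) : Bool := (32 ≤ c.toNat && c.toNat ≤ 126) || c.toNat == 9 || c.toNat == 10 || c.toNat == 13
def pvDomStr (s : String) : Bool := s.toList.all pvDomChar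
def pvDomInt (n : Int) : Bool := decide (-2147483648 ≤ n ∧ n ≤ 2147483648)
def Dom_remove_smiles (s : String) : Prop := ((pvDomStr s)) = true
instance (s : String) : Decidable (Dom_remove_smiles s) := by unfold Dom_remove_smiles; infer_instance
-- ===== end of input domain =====

-- B replaces A's hand-written position-advancing state machine by one compiled
-- regex substitution (starter, greedy dashes, one-plus brackets, replaced by nothing);
-- idiomatic, and measured faster in a timing run (C-level regex engine vs Python loop).

-- ===== PORT A =====
def pvStarter (c : Char) : Bool := c == ';' || c == ':'   -- s[pos] in ';:'
def pvBracket (c : Char) : Bool :=                        -- c in '(){}[]'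
  c == '(' || c == ')' || c == '{' || c == '}' || c == '[' || c == ']'

-- inner loop: while pos < len(s) and s[pos] == '-': pos += 1
def skipDash (s : List Char) (p : Nat) : Nat :=
  if h : p < s.length then
    if s[p] == '-' then skipDash s (p + 1) else p
  else p
termination_by s.length - p
decreasing_by omega

-- inner loop: while pos < len(s) and s[pos] in '(){}[]': pos += 1
def skipBr (s : List Char) (p : Nat) : Nat :=
  if h : p < s.length then
    if pvBracket s[p] then skipBr s (p + 1) else p
  else p
termination_by s.length - p
decreasing_by omega

theorem le_skipDash (s : List Char) (p : Nat) : p ≤ skipDash s p := by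
  fun_induction skipDash s p <;> omega

theorem le_skipBr (s : List Char) (p : Nat) : p ≤ skipBr s p := by
  fun_induction skipBr s p <;> omega

-- main while loop of A; `out` is the accumulator list, pos the cursor;
-- the cursor after both inner loops ('pos' at the membership test) is
-- skipBr s (skipDash s (pos + 1)), written out at each use site
def removeLoop (s : List Char) (pos : Nat) (out : List Char) : List Char :=
  if h : pos < s.length then
    if ¬ pvStarter s[pos] then
      removeLoop s (pos + 1) (out ++ [s[pos]])
    else
      if pvBracket s[skipBr s (skipDash s (pos + 1)) - 1]! then
        removeLoop s (skipBr s (skipDash s (pos + 1))) out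
      else
        -- out.extend(s[back:pos]); both slice indices are nonnegative, back ≤ pos ≤ len
        removeLoop s (skipBr s (skipDash s (pos + 1)))
          (out ++ (s.drop pos).take (skipBr s (skipDash s (pos + 1)) - pos))
  else out
termination_by s.length - pos
decreasing_by
  · omega
  · have h1 := le_skipDash s (pos + 1)
    have h2 := le_skipBr s (skipDash s (pos + 1))
    omega
  · have h1 := le_skipDash s (pos + 1)
    have h2 := le_skipBr s (skipDash s (pos + 1))
    omega

def remove_smiles (s : String) : String := String.ofList (removeLoop s.toList 0 [])

-- ===== PORT B =====
-- Source B is re.sub(r'[;:]-*[(){}\[\]]+', '', s): a left-to-right non-overlapping scan;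
-- at each position try the pattern (starter, greedy '-'*, at least one bracket);
-- on a match drop it and continue after it, otherwise emit one char and move on.
def subSmiles (l : List Char) : List Char :=
  match l with
  | [] => []
  | c :: rest =>
    if pvStarter c && !((rest.dropWhile (· == '-')).takeWhile pvBracket).isEmpty then
      subSmiles ((rest.dropWhile (· == '-')).dropWhile pvBracket)
    else c :: subSmiles rest
termination_by l.length
decreasing_by
  · have h1 := (List.dropWhile_suffix (l := rest) (· == '-')).length_le
    have h2 := (List.dropWhile_suffix (l := rest.dropWhile (· == '-')) pvBracket).length_le
    simp only [List.length_cons]; omega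
  · simp

def remove_smiles_alt (s : String) : String := String.ofList (subSmiles s.toList)

-- ===== PRECONDITION & SPEC =====
def Spec_remove_smiles (s : String) (out : String) : Prop := out = remove_smiles_alt s
instance (s : String) (out : String) : Decidable (Spec_remove_smiles s out) := by unfold Spec_remove_smiles; infer_instance

-- ===== CLAIM (what is proved, stated in full; the proofs are below) =====
def Claim_equal_remove_smiles : Prop := ∀ (s : String), Dom_remove_smiles s → Spec_remove_smiles s (remove_smiles s)

-- ===== LEMMAS AND PROOFS =====

theorem take_length_takeWhile {α : Type} (p : α → Bool) (l : List α) :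
    l.take (l.takeWhile p).length = l.takeWhile p := by
  induction l with
  | nil => simp
  | cons a t ih =>
    by_cases h : p a = true
    · rw [List.takeWhile_cons_of_pos h]
      simp only [List.length_cons, List.take_succ_cons, ih]
    · rw [List.takeWhile_cons_of_neg (by simp [h])]
      simp

theorem dropWhile_eq_drop {α : Type} (p : α → Bool) (l : List α) :
    l.dropWhile p = l.drop (l.takeWhile p).length := by
  induction l with
  | nil => simp
  | cons a t ih =>
    by_cases h : p a = true
    · rw [List.takeWhile_cons_of_pos h, List.dropWhile_cons_of_pos h, ih]; rfl
    · rw [List.takeWhile_cons_of_neg (by simp [h]), List.dropWhile_cons_of_neg (by simp [h])]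
      simp

-- dropWhile on a suffix of s expressed as an absolute drop of s
theorem dropWhile_drop (s : List Char) (p : Nat) (q : Char → Bool) :
    (s.drop p).dropWhile q = s.drop (p + ((s.drop p).takeWhile q).length) := by
  rw [dropWhile_eq_drop, List.drop_drop]

theorem skipDash_eq (s : List Char) (p : Nat) :
    skipDash s p = p + ((s.drop p).takeWhile (· == '-')).length := by
  fun_induction skipDash s p with
  | case1 p h hd ih =>
    rw [List.drop_eq_getElem_cons h]
    simp only [List.takeWhile_cons, hd, if_true, List.length_cons]
    omega
  | case2 p h hd =>
    have hd' : (s[p] == '-') = false := by simpa using hd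
    rw [List.drop_eq_getElem_cons h]
    simp [hd']
  | case3 p h =>
    rw [List.drop_eq_nil_iff.2 (by omega)]
    simp

theorem skipBr_eq (s : List Char) (p : Nat) :
    skipBr s p = p + ((s.drop p).takeWhile pvBracket).length := by
  fun_induction skipBr s p with
  | case1 p h hd ih =>
    rw [List.drop_eq_getElem_cons h]
    simp only [List.takeWhile_cons, hd, if_true, List.length_cons]
    omega
  | case2 p h hd =>
    have hd' : pvBracket s[p] = false := by simpa using hd
    rw [List.drop_eq_getElem_cons h]
    simp [hd']
  | case3 p h =>
    rw [List.drop_eq_nil_iff.2 (by omega)]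
    simp

-- the char of s just before p + t.length satisfies q, where t = (s.drop p).takeWhile q ≠ []
theorem getElem_last_seg (s : List Char) (p : Nat) (q : Char → Bool)
    (hp : p ≤ s.length) (hne : ((s.drop p).takeWhile q).length ≠ 0) :
    q (s[p + ((s.drop p).takeWhile q).length - 1]!) = true := by
  have hlt : ((s.drop p).takeWhile q).length ≤ (s.drop p).length :=
    (List.takeWhile_prefix q).length_le
  have hdl : (s.drop p).length = s.length - p := List.length_drop ..
  have hlen : p + ((s.drop p).takeWhile q).length - 1 < s.length := by omega
  rw [getElem!_pos s _ hlen]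
  have hidx : p + ((s.drop p).takeWhile q).length - 1
      = p + (((s.drop p).takeWhile q).length - 1) := by omega
  have h1 : s[p + ((s.drop p).takeWhile q).length - 1]'hlen
      = (s.drop p)[((s.drop p).takeWhile q).length - 1]'(by omega) := by
    simp only [hidx]
    exact (List.getElem_drop ..).symm
  rw [h1]
  have hm : q (((s.drop p).takeWhile q)[((s.drop p).takeWhile q).length - 1]'(by omega)) = true :=
    List.mem_takeWhile_imp (List.getElem_mem _)
  have he : ((s.drop p).takeWhile q)[((s.drop p).takeWhile q).length - 1]'(by omega)
      = (s.drop p)[((s.drop p).takeWhile q).length - 1]'(by omega) :=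
    (List.takeWhile_prefix q).getElem (by omega)
  exact he ▸ hm

theorem starter_not_bracket (c : Char) (h : pvStarter c = true) : pvBracket c = false := by
  simp only [pvStarter, Bool.or_eq_true, beq_iff_eq] at h
  rcases h with h | h <;> subst h <;> decide

theorem skipDash_le_length (s : List Char) (p : Nat) (h : p ≤ s.length) :
    skipDash s p ≤ s.length := by
  rw [skipDash_eq]
  have h1 := (List.takeWhile_prefix (l := s.drop p) (· == '-')).length_le
  have h2 : (s.drop p).length = s.length - p := List.length_drop ..
  omega

-- characterization of s[p3-1] (the char A's membership test inspects)
theorem p3_pred_char (s : List Char) (pos : Nat) (hpos : pos < s.length)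
    (hstart : pvStarter (s[pos]'hpos) = true) :
    (((s.drop (skipDash s (pos+1))).takeWhile pvBracket).length ≠ 0 →
      pvBracket (s[skipBr s (skipDash s (pos+1)) - 1]!) = true) ∧
    (((s.drop (skipDash s (pos+1))).takeWhile pvBracket).length = 0 →
      pvBracket (s[skipBr s (skipDash s (pos+1)) - 1]!) = false) := by
  have hq1 : pos + 1 ≤ skipDash s (pos+1) := le_skipDash s (pos+1)
  have hqlen : skipDash s (pos+1) ≤ s.length := skipDash_le_length s (pos+1) (by omega)
  constructor
  · intro hne
    have := getElem_last_seg s (skipDash s (pos+1)) pvBracket hqlen hne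
    rwa [← skipBr_eq] at this
  · intro hz
    have hp3 : skipBr s (skipDash s (pos+1)) = skipDash s (pos+1) := by
      rw [skipBr_eq, hz]
      omega
    rw [hp3]
    by_cases hd : ((s.drop (pos+1)).takeWhile (· == '-')).length = 0
    · -- no dashes: skipDash returns pos+1, s[pos] is the starter itself
      have hq : skipDash s (pos+1) = pos + 1 := by rw [skipDash_eq, hd]
      rw [hq]
      simp only [Nat.add_sub_cancel]
      rw [getElem!_pos s pos hpos]
      exact starter_not_bracket _ hstart
    · -- dashes present: s[skipDash-1] is the last dash
      have hch := getElem_last_seg s (pos+1) (· == '-') (by omega) hd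
      rw [← skipDash_eq] at hch
      have : s[skipDash s (pos+1) - 1]! = '-' := by simpa using hch
      rw [this]; decide

-- re.sub leaves a block of dashes untouched one char at a time
theorem subSmiles_dashes (d r : List Char) (hd : ∀ c ∈ d, c = '-') :
    subSmiles (d ++ r) = d ++ subSmiles r := by
  induction d with
  | nil => simp
  | cons a t ih =>
    have ha : a = '-' := hd a (by simp)
    have hs : pvStarter a = false := by rw [ha]; decide
    rw [List.cons_append, subSmiles, hs]
    simp only [Bool.false_and, Bool.false_eq_true, if_false]
    rw [ih (fun c hc => hd c (by simp [hc]))]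
    simp

-- loop invariant: A's loop from cursor pos equals out ++ (B's scan of the rest)
theorem removeLoop_eq (s : List Char) (pos : Nat) (out : List Char) :
    removeLoop s pos out = out ++ subSmiles (s.drop pos) := by
  fun_induction removeLoop s pos out with
  | case1 pos out h hns ih =>
    -- ordinary char: both sides emit it
    rw [List.drop_eq_getElem_cons h, subSmiles]
    have hf : pvStarter s[pos] = false := by simpa using hns
    rw [hf]
    simp only [Bool.false_and, Bool.false_eq_true, if_false]
    rw [ih]; simp
  | case2 pos out h hns hbr ih =>
    -- smile: A drops the run, B's tryMatch succeeds
    have hstart : pvStarter (s[pos]'h) = true := by simpa using hns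
    have hchar := p3_pred_char s pos h hstart
    have hne : ((s.drop (skipDash s (pos+1))).takeWhile pvBracket).length ≠ 0 := by
      intro hz; rw [hchar.2 hz] at hbr; exact absurd hbr (by decide)
    rw [List.drop_eq_getElem_cons h, subSmiles, hstart]
    have hdq : (s.drop (pos+1)).dropWhile (· == '-') = s.drop (skipDash s (pos+1)) := by
      rw [dropWhile_drop, ← skipDash_eq]
    have hdp3 : (s.drop (skipDash s (pos+1))).dropWhile pvBracket
        = s.drop (skipBr s (skipDash s (pos+1))) := by
      rw [dropWhile_drop, ← skipBr_eq]
    rw [hdq, hdp3]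
    have hemp : ((s.drop (skipDash s (pos+1))).takeWhile pvBracket).isEmpty = false := by
      cases hc : (s.drop (skipDash s (pos+1))).takeWhile pvBracket with
      | nil => exact absurd (by rw [hc]; rfl) hne
      | cons a t => rfl
    rw [hemp]
    simp only [Bool.not_false, Bool.and_true, if_true]
    exact ih
  | case3 pos out h hns hbr ih =>
    -- kept run: no bracket followed; B fails the match and re-walks the dashes
    have hstart : pvStarter (s[pos]'h) = true := by simpa using hns
    have hchar := p3_pred_char s pos h hstart
    have hz : ((s.drop (skipDash s (pos+1))).takeWhile pvBracket).length = 0 := by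
      by_contra hne; rw [hchar.1 hne] at hbr; exact absurd hbr (by decide)
    have hp3 : skipBr s (skipDash s (pos+1)) = skipDash s (pos+1) := by
      rw [skipBr_eq, hz]
      omega
    have hqv : skipDash s (pos+1) = pos + 1 + ((s.drop (pos+1)).takeWhile (· == '-')).length :=
      skipDash_eq ..
    have hdq : (s.drop (pos+1)).dropWhile (· == '-') = s.drop (skipDash s (pos+1)) := by
      rw [dropWhile_drop, ← skipDash_eq]
    -- the slice s[back:pos] is s[pos] :: (the dashes)
    have hslice : (s.drop pos).take (skipBr s (skipDash s (pos+1)) - pos)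
        = s[pos] :: (s.drop (pos+1)).takeWhile (· == '-') := by
      rw [hp3, hqv, List.drop_eq_getElem_cons h]
      have he : pos + 1 + ((s.drop (pos+1)).takeWhile (· == '-')).length - pos
          = ((s.drop (pos+1)).takeWhile (· == '-')).length + 1 := by omega
      rw [he, List.take_succ_cons, take_length_takeWhile]
    have hemp : ((s.drop (skipDash s (pos+1))).takeWhile pvBracket).isEmpty = true := by
      cases hc : (s.drop (skipDash s (pos+1))).takeWhile pvBracket with
      | nil => rfl
      | cons a t => rw [hc] at hz; simp at hz
    have hrest : s.drop (pos+1)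
        = (s.drop (pos+1)).takeWhile (· == '-') ++ s.drop (skipDash s (pos+1)) := by
      conv_lhs => rw [← List.takeWhile_append_dropWhile (p := (· == '-')) (l := s.drop (pos+1))]
      rw [hdq]
    have hsub : subSmiles (s.drop (pos+1))
        = (s.drop (pos+1)).takeWhile (· == '-') ++ subSmiles (s.drop (skipDash s (pos+1))) := by
      conv_lhs => rw [hrest]
      exact subSmiles_dashes _ _ (fun c hc => by
        have := List.mem_takeWhile_imp hc
        simpa using this)
    rw [ih, hslice]
    rw [List.drop_eq_getElem_cons h, subSmiles, hstart, hdq, hemp]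
    simp only [Bool.not_true, Bool.and_false, Bool.false_eq_true, if_false]
    rw [hsub, hp3]
    simp
  | case4 pos out h =>
    rw [List.drop_eq_nil_iff.2 (by omega), subSmiles]
    simp

-- ===== VERDICT (by name: the statement is the Claim_ definition above) =====
theorem remove_smiles_spec : Claim_equal_remove_smiles := by
  intro s _
  unfold Spec_remove_smiles remove_smiles remove_smiles_alt
  rw [removeLoop_eq]
  simp
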